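-- pv_equiv track=rewrite | github.com/tomdstanton/Verticall | phylo/distance.py | choose_window_size_and_step
-- ===== SOURCE A (Python) =====
-- def choose_window_size_and_step(cigars, target_window_count):
--     """
--     This function chooses an appropriate window size and step for the given CIGARs. It tries to
--     balance larger windows, which give higher-resolution identity samples, especially with
--     closely-related assemblies, and smaller windows, which allow for more identity samples.
--     """
--     window_step = 1000
--     while window_step > 1:
--         window_size = window_step * 100
--         if get_window_count(cigars, window_size, window_step) > target_window_count:
--             return window_size, window_step
--         window_step -= 1
--     return window_step * 100, window_step
--
-- def get_window_count(cigars, window_size, window_step):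
--     """
--     For a given window size, window step and set of CIGARs, this function returns how many windows
--     there will be in total.
--     """
--     count = 0
--     for cigar in cigars:
--         cigar_len = len(cigar)
--         if cigar_len < window_size:
--             continue
--         cigar_len -= window_size
--         count += 1
--         count += cigar_len // window_step
--     return count
-- ===== SOURCE B (Python) =====
-- def choose_window_size_and_step(cigars, target_window_count):
--     # Binary search for the largest window_step in [2, 1000] whose window count
--     # exceeds the target (the count is antitone in the step), defaulting to 1.
--     lengths = [len(c) for c in cigars]
--
--     def window_count(step):
--         size = step * 100
--         return sum(1 + (L - size) // step for L in lengths if L >= size)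
--
--     lo, hi, best = 2, 1000, 1
--     while lo <= hi:
--         mid = (lo + hi) // 2
--         if window_count(mid) > target_window_count:
--             best = mid
--             lo = mid + 1
--         else:
--             hi = mid - 1
--     return best * 100, best
-- ===== Notes on version B (the rewrite author's own statement) =====
-- stated objective: faster
-- what changed: Replaces the linear descending scan over the 999 candidate window_steps by a binary search for the largest step whose window count exceeds the target, exploiting that the count is antitone in the step.
import Mathlib
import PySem

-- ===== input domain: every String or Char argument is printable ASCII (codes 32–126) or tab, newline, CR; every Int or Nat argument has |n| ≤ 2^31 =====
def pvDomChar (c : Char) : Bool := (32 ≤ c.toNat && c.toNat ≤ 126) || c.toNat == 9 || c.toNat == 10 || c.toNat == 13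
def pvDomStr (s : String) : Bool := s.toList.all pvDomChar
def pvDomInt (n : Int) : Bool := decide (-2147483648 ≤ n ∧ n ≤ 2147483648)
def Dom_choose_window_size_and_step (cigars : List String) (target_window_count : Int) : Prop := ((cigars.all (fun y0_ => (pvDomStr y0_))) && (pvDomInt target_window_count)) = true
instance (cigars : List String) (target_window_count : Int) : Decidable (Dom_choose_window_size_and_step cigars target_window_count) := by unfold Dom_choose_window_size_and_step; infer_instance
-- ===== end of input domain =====

-- B replaces A's linear descending scan over the 999 candidate window_steps by a binary
-- search for the largest step whose window count exceeds the target (count is antitone in the step).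

-- ===== PORT A =====
def get_window_count (cigars : List String) (window_size window_step : Int) : Int :=
  cigars.foldl (fun count cigar =>
    let cigar_len := PySem.Str.len cigar
    if cigar_len < window_size then count
    else count + 1 + PySem.Int.floordiv (cigar_len - window_size) window_step) 0

def chooseGoA (cigars : List String) (target : Int) : Nat → List Int
  | 0 => [0, 0]      -- never reached from the entry point (loop exits with window_step = 1)
  | 1 => [100, 1]
  | (s+2) =>
    let ws : Int := (s : Int) + 2
    if get_window_count cigars (ws * 100) ws > target then [ws * 100, ws]
    else chooseGoA cigars target (s+1)

def choose_window_size_and_step (cigars : List String) (target_window_count : Int) : List Int :=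
  chooseGoA cigars target_window_count 1000

-- ===== PORT B =====
def window_count_alt (lengths : List Int) (step : Int) : Int :=
  let size := step * 100
  lengths.foldl (fun acc L => if L ≥ size then acc + (1 + PySem.Int.floordiv (L - size) step) else acc) 0

-- fuel (first argument) only totalizes the while loop: 1000 iterations always suffice
-- since the interval [lo, hi] at least halves each step (entry interval is [2, 1000]).
def chooseGoB (lengths : List Int) (target : Int) : Nat → Int → Int → Int → Int
  | 0, _, _, best => best
  | (k+1), lo, hi, best =>
    if lo ≤ hi then
      if window_count_alt lengths (PySem.Int.floordiv (lo + hi) 2) > target then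
        chooseGoB lengths target k (PySem.Int.floordiv (lo + hi) 2 + 1) hi (PySem.Int.floordiv (lo + hi) 2)
      else
        chooseGoB lengths target k lo (PySem.Int.floordiv (lo + hi) 2 - 1) best
    else best

def choose_window_size_and_step_alt (cigars : List String) (target_window_count : Int) : List Int :=
  let lengths := cigars.map PySem.Str.len
  let best := chooseGoB lengths target_window_count 1000 2 1000 1
  [best * 100, best]

-- ===== CLAIM (what is proved, stated in full; the proofs are below) =====
def Spec_choose_window_size_and_step (cigars : List String) (target_window_count : Int) (out : List Int) : Prop := out = choose_window_size_and_step_alt cigars target_window_count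
instance (cigars : List String) (target_window_count : Int) (out : List Int) : Decidable (Spec_choose_window_size_and_step cigars target_window_count out) := by unfold Spec_choose_window_size_and_step; infer_instance

def Claim_equal_choose_window_size_and_step : Prop := ∀ (cigars : List String) (target_window_count : Int), Dom_choose_window_size_and_step cigars target_window_count → Spec_choose_window_size_and_step cigars target_window_count (choose_window_size_and_step cigars target_window_count)

-- ===== LEMMAS AND PROOFS =====

-- B's count over the pre-extracted lengths equals A's count helper.
lemma wc_eq (cigars : List String) (st : Int) :
    window_count_alt (cigars.map PySem.Str.len) st = get_window_count cigars (st * 100) st := by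
  simp only [window_count_alt, get_window_count]
  rw [List.foldl_map]
  congr 1
  funext acc c
  by_cases h : PySem.Str.len c < st * 100
  · rw [if_neg (not_le.mpr h), if_pos h]
  · rw [if_pos (not_lt.mp h), if_neg h]; ring

-- the window count is antitone in the step
lemma gwc_antitone (cigars : List String) (s t : Int) (hs : 1 ≤ s) (hst : s ≤ t) :
    get_window_count cigars (t * 100) t ≤ get_window_count cigars (s * 100) s := by
  have hs0 : (0:Int) < s := by linarith
  have ht0 : (0:Int) < t := by linarith
  simp only [get_window_count]
  suffices h : ∀ (l : List String) (a b : Int), a ≤ b →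
      List.foldl (fun count cigar =>
        if PySem.Str.len cigar < t * 100 then count
        else count + 1 + PySem.Int.floordiv (PySem.Str.len cigar - t * 100) t) a l ≤
      List.foldl (fun count cigar =>
        if PySem.Str.len cigar < s * 100 then count
        else count + 1 + PySem.Int.floordiv (PySem.Str.len cigar - s * 100) s) b l by
    exact h cigars 0 0 le_rfl
  intro l
  induction l with
  | nil => intro a b hab; simpa using hab
  | cons c cs ih =>
    intro a b hab
    simp only [List.foldl_cons]
    apply ih
    by_cases h1 : PySem.Str.len c < t * 100
    · rw [if_pos h1]
      by_cases h2 : PySem.Str.len c < s * 100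
      · rw [if_pos h2]; exact hab
      · rw [if_neg h2]
        have hfd : 0 ≤ PySem.Int.floordiv (PySem.Str.len c - s * 100) s := by
          rw [PySem.Int.floordiv_eq_ediv_of_pos hs0]
          exact Int.ediv_nonneg (by linarith [not_lt.mp h2]) (le_of_lt hs0)
        linarith
    · rw [if_neg h1]
      have hL : t * 100 ≤ PySem.Str.len c := not_lt.mp h1
      have hle : s * 100 ≤ t * 100 := by linarith
      rw [if_neg (not_lt.mpr (by linarith : s * 100 ≤ PySem.Str.len c))]
      have key : PySem.Int.floordiv (PySem.Str.len c - t * 100) t ≤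
          PySem.Int.floordiv (PySem.Str.len c - s * 100) s := by
        rw [PySem.Int.floordiv_eq_ediv_of_pos ht0, PySem.Int.floordiv_eq_ediv_of_pos hs0]
        have ha : 0 ≤ PySem.Str.len c - t * 100 := by linarith
        have step1 : (PySem.Str.len c - t * 100) / t ≤ (PySem.Str.len c - t * 100) / s := by
          rw [Int.le_ediv_iff_mul_le hs0]
          calc (PySem.Str.len c - t * 100) / t * s
              ≤ (PySem.Str.len c - t * 100) / t * t :=
                mul_le_mul_of_nonneg_left hst (Int.ediv_nonneg ha (by linarith))
            _ ≤ PySem.Str.len c - t * 100 := Int.ediv_mul_le _ (ne_of_gt ht0)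
        have step2 : (PySem.Str.len c - t * 100) / s ≤ (PySem.Str.len c - s * 100) / s :=
          Int.ediv_le_ediv hs0 (by linarith)
        linarith
      linarith

-- characterisation of A's descending scan: it returns the largest admissible step
lemma aGo_eq (cigars : List String) (target : Int) :
    ∀ s b : Nat, 1 ≤ b → b ≤ s →
      (b = 1 ∨ get_window_count cigars ((b : Int) * 100) (b : Int) > target) →
      (∀ t : Nat, b < t → t ≤ s → ¬ (get_window_count cigars ((t : Int) * 100) (t : Int) > target)) →
      chooseGoA cigars target s = [(b : Int) * 100, (b : Int)] := by
  intro s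
  induction s using Nat.strong_induction_on with
  | _ s ih =>
    intro b hb1 hbs hP hnone
    match s, hbs with
    | 0, hbs => omega
    | 1, hbs =>
      have : b = 1 := by omega
      subst this
      simp [chooseGoA]
    | (s+2), hbs =>
      have hcast : ((s + 2 : Nat) : Int) = (s : Int) + 2 := by push_cast; ring
      simp only [chooseGoA]
      split_ifs with h
      · have hbeq : b = s + 2 := by
          by_contra hne
          exact hnone (s + 2) (by omega) le_rfl (by rwa [hcast])
        subst hbeq
        rw [hcast]
      · have hble : b ≤ s + 1 := by
          rcases hP with h1 | hPb
          · omega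
          · by_contra hgt
            have : b = s + 2 := by omega
            subst this
            rw [hcast] at hPb
            exact h hPb
        exact ih (s + 1) (by omega) b hb1 hble hP
          (fun t ht hts => hnone t ht (by omega))

-- invariant of B's binary search
lemma bGo_spec (cigars : List String) (target : Int) :
    ∀ k : Nat, ∀ lo hi best : Int, (hi + 1 - lo).toNat ≤ k →
      1 ≤ best → best < lo → best ≤ 1000 → hi ≤ 1000 → 2 ≤ lo →
      (best = 1 ∨ get_window_count cigars (best * 100) best > target) →
      (∀ t : Int, best < t → t < lo → ¬ (get_window_count cigars (t * 100) t > target)) →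
      (∀ t : Int, hi < t → t ≤ 1000 → ¬ (get_window_count cigars (t * 100) t > target)) →
      (1 ≤ chooseGoB (cigars.map PySem.Str.len) target k lo hi best ∧
       chooseGoB (cigars.map PySem.Str.len) target k lo hi best ≤ 1000 ∧
       (chooseGoB (cigars.map PySem.Str.len) target k lo hi best = 1 ∨
        get_window_count cigars (chooseGoB (cigars.map PySem.Str.len) target k lo hi best * 100)
          (chooseGoB (cigars.map PySem.Str.len) target k lo hi best) > target) ∧
       (∀ t : Int, chooseGoB (cigars.map PySem.Str.len) target k lo hi best < t → t ≤ 1000 →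
          ¬ (get_window_count cigars (t * 100) t > target))) := by
  intro k
  induction k with
  | zero =>
    intro lo hi best _ h1 h2 h3 h4 h5 hcond h6 h7
    refine ⟨h1, h3, hcond, ?_⟩
    intro t ht ht1000
    by_cases htlo : t < lo
    · exact h6 t ht htlo
    · exact h7 t (by omega) ht1000
  | succ k ih =>
    intro lo hi best hk h1 h2 h3 h4 h5 hcond h6 h7
    by_cases hlh : lo ≤ hi
    · obtain ⟨hmlo, hmhi⟩ := PySem.Int.floordiv_two_mid_bounds hlh
      simp only [chooseGoB, if_pos hlh]
      by_cases hQ : window_count_alt (cigars.map PySem.Str.len) (PySem.Int.floordiv (lo + hi) 2) > target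
      · rw [if_pos hQ]
        rw [wc_eq] at hQ
        exact ih (PySem.Int.floordiv (lo + hi) 2 + 1) hi (PySem.Int.floordiv (lo + hi) 2)
          (by omega) (by omega) (by omega) (by omega) h4 (by omega) (Or.inr hQ)
          (fun t ht ht' => absurd ht (by omega)) h7
      · rw [if_neg hQ]
        rw [wc_eq] at hQ
        apply ih lo (PySem.Int.floordiv (lo + hi) 2 - 1) best (by omega) h1 h2 h3 (by omega) h5 hcond h6
        intro t ht ht1000
        by_cases hthi : hi < t
        · exact h7 t hthi ht1000
        · intro hPt
          exact hQ (lt_of_lt_of_le hPt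
            (gwc_antitone cigars (PySem.Int.floordiv (lo + hi) 2) t (by omega) (by omega)))
    · simp only [chooseGoB, if_neg hlh]
      refine ⟨h1, h3, hcond, ?_⟩
      intro t ht ht1000
      by_cases htlo : t < lo
      · exact h6 t ht htlo
      · exact h7 t (by omega) ht1000

-- ===== VERDICT (by name: the statement is the Claim_ definition above) =====
theorem choose_window_size_and_step_spec : Claim_equal_choose_window_size_and_step := by
  intro cigars target _
  unfold Spec_choose_window_size_and_step choose_window_size_and_step choose_window_size_and_step_alt
  obtain ⟨h1, h2, h3, h4⟩ := bGo_spec cigars target 1000 2 1000 1 (by omega)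
    (by omega) (by omega) (by omega) (by omega) (by omega) (Or.inl rfl)
    (fun t ht ht' => absurd ht (by omega)) (fun t ht ht' => absurd ht (by omega))
  have hc : ((chooseGoB (cigars.map PySem.Str.len) target 1000 2 1000 1).toNat : Int) =
      chooseGoB (cigars.map PySem.Str.len) target 1000 2 1000 1 := Int.toNat_of_nonneg (by omega)
  have hA := aGo_eq cigars target 1000 (chooseGoB (cigars.map PySem.Str.len) target 1000 2 1000 1).toNat
    (by omega) (by omega)
    (by rcases h3 with h | h
        · left; omega
        · right; rw [hc]; exact h)
    (by intro t ht h1000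
        apply h4 (t : Int) (by omega) (by exact_mod_cast h1000))
  rw [hc] at hA
  exact hA
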